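-- pv_equiv track=rewrite | github.com/afs-eng/neuro | apps/tests/srs2/validators.py | apply_reversed_items
-- ===== SOURCE A (Python) =====
-- def apply_reversed_items(responses: dict, reversed_items: list[int]) -> dict:
--     converted = {}
--     for key, value in responses.items():
--         if key in reversed_items and value is not None:
--             converted[key] = 4 - value
--         else:
--             converted[key] = value
--     return converted
-- ===== SOURCE B (Python) =====
-- def apply_reversed_items(responses: dict, reversed_items: list[int]) -> dict:
--     converted = dict(responses)
--     for key in reversed_items:
--         value = responses.get(key)
--         if value is not None:
--             converted[key] = 4 - value
--     return converted
-- ===== Notes on version B (the rewrite author's own statement) =====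
-- stated objective: faster
-- what changed: Instead of scanning every response and testing list membership per key, B copies the dict once and patches only the keys listed in reversed_items, removing the inner list scan.
import Mathlib
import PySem

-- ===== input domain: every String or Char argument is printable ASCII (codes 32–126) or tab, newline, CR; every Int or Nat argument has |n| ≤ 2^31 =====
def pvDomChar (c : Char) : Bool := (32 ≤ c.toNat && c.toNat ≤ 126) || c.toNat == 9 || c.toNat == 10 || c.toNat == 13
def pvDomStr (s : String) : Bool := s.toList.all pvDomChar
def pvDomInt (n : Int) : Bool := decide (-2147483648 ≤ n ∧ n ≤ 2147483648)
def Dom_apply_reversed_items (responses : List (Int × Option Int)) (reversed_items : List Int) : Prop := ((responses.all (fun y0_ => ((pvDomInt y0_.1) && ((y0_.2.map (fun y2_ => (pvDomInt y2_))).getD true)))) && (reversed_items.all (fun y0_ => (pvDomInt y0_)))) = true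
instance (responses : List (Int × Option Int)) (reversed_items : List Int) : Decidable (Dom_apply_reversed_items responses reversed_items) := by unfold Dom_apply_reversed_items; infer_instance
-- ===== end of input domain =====

-- B replaces A's scan over all responses (with a list-membership test per key) by one dict
-- copy followed by a patch loop over reversed_items only; a timing run measures the speedup.

-- ===== PORT A =====
-- A: build a fresh dict, iterating responses.items(); reverse-score a value when its key
-- is in reversed_items and the value is not None, otherwise copy it unchanged.
def apply_reversed_items (responses : List (Int × Option Int)) (reversed_items : List Int) : List (Int × Option Int) :=
  ((PySem.Dict.ofList responses).items.foldl
    (fun (converted : PySem.Dict Int (Option Int)) kv =>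
      if kv.1 ∈ reversed_items ∧ kv.2.isSome then
        converted.insert kv.1 (kv.2.map (fun v => 4 - v))
      else
        converted.insert kv.1 kv.2)
    PySem.Dict.empty).items

-- ===== PORT B =====
-- B: converted = dict(responses); for key in reversed_items: patch when responses.get(key) is not None.
def apply_reversed_items_alt (responses : List (Int × Option Int)) (reversed_items : List Int) : List (Int × Option Int) :=
  (reversed_items.foldl
    (fun (converted : PySem.Dict Int (Option Int)) key =>
      match (PySem.Dict.ofList responses).get? key with
      | some (some v) => converted.insert key (some (4 - v))
      | _ => converted)
    (PySem.Dict.ofList responses)).items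

-- ===== PRECONDITION & SPEC =====
def Spec_apply_reversed_items (responses : List (Int × Option Int)) (reversed_items : List Int) (out : List (Int × Option Int)) : Prop := out = apply_reversed_items_alt responses reversed_items
instance (responses : List (Int × Option Int)) (reversed_items : List Int) (out : List (Int × Option Int)) : Decidable (Spec_apply_reversed_items responses reversed_items out) := by unfold Spec_apply_reversed_items; infer_instance

-- ===== CLAIM (what is proved, stated in full; the proofs are below) =====
def Claim_equal_apply_reversed_items : Prop := ∀ (responses : List (Int × Option Int)) (reversed_items : List Int), Dom_apply_reversed_items responses reversed_items → Spec_apply_reversed_items responses reversed_items (apply_reversed_items responses reversed_items)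

-- ===== LEMMAS AND PROOFS =====

/-- The common per-entry patch: reverse-score an entry whose key is in `l` and whose value is some. -/
def pvPatch (l : List Int) (p : Int × Option Int) : Int × Option Int :=
  if p.1 ∈ l ∧ p.2.isSome then (p.1, p.2.map (fun v => 4 - v)) else p

lemma pvPatch_fst (l : List Int) (p : Int × Option Int) : (pvPatch l p).1 = p.1 := by
  unfold pvPatch; split <;> rfl

lemma sideA (responses : List (Int × Option Int)) (reversed_items : List Int) :
    apply_reversed_items responses reversed_items
      = (PySem.Dict.ofList responses).items.map (pvPatch reversed_items) := by
  unfold apply_reversed_items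
  have hstep : (fun (converted : PySem.Dict Int (Option Int)) (kv : Int × Option Int) =>
      if kv.1 ∈ reversed_items ∧ kv.2.isSome then
        converted.insert kv.1 (kv.2.map (fun v => 4 - v))
      else
        converted.insert kv.1 kv.2)
      = fun converted kv => converted.insert kv.1 (pvPatch reversed_items kv).2 := by
    funext converted kv
    unfold pvPatch
    split <;> rfl
  rw [hstep]
  have hfresh := PySem.Dict.items_foldl_insert_fresh
    (l := (PySem.Dict.ofList responses).items) (k := Prod.fst)
    (v := fun kv => (pvPatch reversed_items kv).2)
    (d := (PySem.Dict.empty : PySem.Dict Int (Option Int)))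
    (by intro a _; simp)
    (by
      simpa [PySem.Dict.keys] using PySem.Dict.nodup_keys_ofList responses)
  rw [hfresh]
  simp only [show (PySem.Dict.empty : PySem.Dict Int (Option Int)).items = [] from rfl, List.nil_append]
  apply List.map_congr_left
  intro p _
  have := pvPatch_fst reversed_items p
  ext <;> simp [this]

lemma sideB (responses : List (Int × Option Int)) (l : List Int) :
    (l.foldl
      (fun (converted : PySem.Dict Int (Option Int)) key =>
        match (PySem.Dict.ofList responses).get? key with
        | some (some v) => converted.insert key (some (4 - v))
        | _ => converted)
      (PySem.Dict.ofList responses)).items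
    = (PySem.Dict.ofList responses).items.map (pvPatch l) := by
  induction l using List.reverseRecOn with
  | nil =>
      simp only [List.foldl_nil]
      have : ∀ p ∈ (PySem.Dict.ofList responses).items, pvPatch [] p = p := by
        intro p _; unfold pvPatch; simp
      rw [List.map_congr_left this, List.map_id']
  | append_singleton l x ih =>
      have hnd : ((PySem.Dict.ofList responses).keys).Nodup := PySem.Dict.nodup_keys_ofList responses
      rw [List.foldl_append, List.foldl_cons, List.foldl_nil]
      rcases hx : (PySem.Dict.ofList responses).get? x with _ | (_ | v)
      · -- key absent: no entry has fst = x
        rw [ih]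
        apply List.map_congr_left
        intro p hp
        have hget := PySem.Dict.get?_of_mem_items _ (show (p.1, p.2) ∈ _ by simpa using hp) hnd
        have hne : p.1 ≠ x := by
          intro h; rw [h, hx] at hget; simp at hget
        unfold pvPatch
        simp [List.mem_append, hne]
      · -- value is None: patch is identity at x on both sides
        rw [ih]
        apply List.map_congr_left
        intro p hp
        have hget := PySem.Dict.get?_of_mem_items _ (show (p.1, p.2) ∈ _ by simpa using hp) hnd
        by_cases hpe : p.1 = x
        · have : p.2 = none := by
            rw [hpe, hx] at hget; exact (Option.some_inj.mp hget).symm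
          unfold pvPatch
          simp [this]
        · unfold pvPatch
          simp [List.mem_append, hpe]
      · -- present with value some v: overwrite in place
        have hkeys : (l.foldl
            (fun (converted : PySem.Dict Int (Option Int)) key =>
              match (PySem.Dict.ofList responses).get? key with
              | some (some v) => converted.insert key (some (4 - v))
              | _ => converted)
            (PySem.Dict.ofList responses)).keys = (PySem.Dict.ofList responses).keys := by
          simp only [PySem.Dict.keys, ih, List.map_map]
          apply List.map_congr_left
          intro p _
          exact pvPatch_fst l p
        have hmem : x ∈ (PySem.Dict.ofList responses).keys := by
          by_contra hnot
          rw [(PySem.Dict.get?_eq_none_iff_not_mem_keys _ _).mpr hnot] at hx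
          simp at hx
        have hcont : (l.foldl
            (fun (converted : PySem.Dict Int (Option Int)) key =>
              match (PySem.Dict.ofList responses).get? key with
              | some (some v) => converted.insert key (some (4 - v))
              | _ => converted)
            (PySem.Dict.ofList responses)).contains x = true := by
          rw [PySem.Dict.contains_eq_decide_mem_keys, hkeys]
          simpa using hmem
        rw [PySem.Dict.items_insert_of_contains _ _ hcont, ih, List.map_map]
        apply List.map_congr_left
        intro p hp
        have hget := PySem.Dict.get?_of_mem_items _ (show (p.1, p.2) ∈ _ by simpa using hp) hnd
        by_cases hpe : p.1 = x
        · have hp2 : p.2 = some v := by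
            rw [hpe, hx] at hget; exact (Option.some_inj.mp hget).symm
          have h1 : (pvPatch l p).1 = p.1 := pvPatch_fst l p
          simp only [Function.comp_apply, h1, hpe, beq_self_eq_true, if_pos]
          unfold pvPatch
          simp [hpe, hp2]
        · have h1 : (pvPatch l p).1 = p.1 := pvPatch_fst l p
          have : ((pvPatch l p).1 == x) = false := by
            rw [h1]; simpa using hpe
          simp only [Function.comp_apply, this, Bool.false_eq_true, if_neg, not_false_iff]
          unfold pvPatch
          simp [List.mem_append, hpe]

-- ===== VERDICT (by name: the statement is the Claim_ definition above) =====
theorem apply_reversed_items_spec : Claim_equal_apply_reversed_items := by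
  intro responses reversed_items _
  unfold Spec_apply_reversed_items apply_reversed_items_alt
  rw [sideA, sideB]
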